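-- pv_equiv track=rewrite | github.com/ardafincan/mft-downstream-task | turkish_tokenizer.py | _longest_prefix_lookup
-- ===== SOURCE A (Python) =====
-- from typing import Dict, List, Optional, Tuple
--
-- def _longest_prefix_lookup(
--     s: str, table: Dict[str, int], max_len: int = None
-- ) -> Tuple[Optional[int], str]:
--     end = min(len(s), max_len) if max_len else len(s)
--     for i in range(end, 0, -1):
--         cand = s[:i]
--         if cand in table:
--             return table[cand], cand
--     return None, ""
-- ===== SOURCE B (Python) =====
-- def _longest_prefix_lookup(s, table, max_len=None):
--     end = min(len(s), max_len) if max_len else len(s)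
--     best = (None, "")
--     for i in range(1, end + 1):
--         cand = s[:i]
--         if cand in table:
--             best = (table[cand], cand)
--     return best
-- ===== Notes on version B (the rewrite author's own statement) =====
-- stated objective: alternative
-- what changed: B scans prefix lengths upward from 1, keeping the last (longest) hit in a best-so-far accumulator, instead of A's downward scan with early return on the first hit.
import Mathlib
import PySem

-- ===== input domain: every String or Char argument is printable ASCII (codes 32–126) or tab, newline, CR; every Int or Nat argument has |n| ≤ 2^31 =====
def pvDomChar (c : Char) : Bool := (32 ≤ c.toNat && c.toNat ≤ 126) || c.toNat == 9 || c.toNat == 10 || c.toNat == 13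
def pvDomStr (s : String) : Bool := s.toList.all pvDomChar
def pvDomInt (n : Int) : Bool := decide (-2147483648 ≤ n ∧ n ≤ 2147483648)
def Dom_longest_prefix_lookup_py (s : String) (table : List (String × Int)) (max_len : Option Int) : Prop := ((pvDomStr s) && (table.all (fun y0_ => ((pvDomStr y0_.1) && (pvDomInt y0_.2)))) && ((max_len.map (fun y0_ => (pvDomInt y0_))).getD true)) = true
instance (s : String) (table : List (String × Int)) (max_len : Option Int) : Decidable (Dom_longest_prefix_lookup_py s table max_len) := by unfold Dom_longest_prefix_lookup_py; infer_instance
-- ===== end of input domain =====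

-- ===== PORT A =====
-- A: scan prefix lengths from end down to 1, return at the first prefix present in table.
def pyEnd (s : String) (max_len : Option Int) : Int :=
  match max_len with
  | some m => if m = 0 then (s.toList.length : Int) else min (s.toList.length : Int) m
  | none => (s.toList.length : Int)

def pyALoop (cs : List Char) (table : List (String × Int)) : Nat → Option Int × String
  | 0 => (none, "")
  | i + 1 =>
    let cand := String.ofList (cs.take (i + 1))
    match PySem.Dict.get? (PySem.Dict.mk table) cand with
    | some v => (some v, cand)
    | none => pyALoop cs table i

def longest_prefix_lookup_py (s : String) (table : List (String × Int)) (max_len : Option Int) : Option Int × String :=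
  pyALoop s.toList table (pyEnd s max_len).toNat

-- ===== PORT B =====
-- B: scan prefix lengths upward from 1, overwriting a best-so-far accumulator on each hit.
def longest_prefix_lookup_py_alt (s : String) (table : List (String × Int)) (max_len : Option Int) : Option Int × String :=
  (List.range' 1 (pyEnd s max_len).toNat).foldl
    (fun best i =>
      let cand := String.ofList (s.toList.take i)
      match PySem.Dict.get? (PySem.Dict.mk table) cand with
      | some v => (some v, cand)
      | none => best)
    (none, "")

-- ===== PRECONDITION & SPEC =====
def Spec_longest_prefix_lookup_py (s : String) (table : List (String × Int)) (max_len : Option Int) (out : Option Int × String) : Prop := out = longest_prefix_lookup_py_alt s table max_len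
instance (s : String) (table : List (String × Int)) (max_len : Option Int) (out : Option Int × String) : Decidable (Spec_longest_prefix_lookup_py s table max_len out) := by unfold Spec_longest_prefix_lookup_py; infer_instance

-- ===== CLAIM (what is proved, stated in full; the proofs are below) =====
def Claim_equal_longest_prefix_lookup_py : Prop := ∀ (s : String) (table : List (String × Int)) (max_len : Option Int), Dom_longest_prefix_lookup_py s table max_len → Spec_longest_prefix_lookup_py s table max_len (longest_prefix_lookup_py s table max_len)

-- ===== LEMMAS AND PROOFS =====
theorem loop_eq (cs : List Char) (table : List (String × Int)) (n : Nat) :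
    pyALoop cs table n =
      (List.range' 1 n).foldl
        (fun best i =>
          let cand := String.ofList (cs.take i)
          match PySem.Dict.get? (PySem.Dict.mk table) cand with
          | some v => (some v, cand)
          | none => best)
        (none, "") := by
  induction n with
  | zero => rfl
  | succ n ih =>
    rw [List.range'_concat, List.foldl_append, ← ih]
    simp only [List.foldl_cons, List.foldl_nil, pyALoop]
    cases PySem.Dict.get? (PySem.Dict.mk table) (String.ofList (cs.take (1 + n))) <;>
      simp [Nat.add_comm 1 n]

-- ===== VERDICT (by name: the statement is the Claim_ definition above) =====
theorem longest_prefix_lookup_py_spec : Claim_equal_longest_prefix_lookup_py := by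
  intro s table max_len _
  unfold Spec_longest_prefix_lookup_py longest_prefix_lookup_py longest_prefix_lookup_py_alt
  exact loop_eq s.toList table (pyEnd s max_len).toNat
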